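-- pv_equiv track=rewrite | github.com/heltonmaia/proj-question-generator | question_generator/questions_ch5_bk/question_ch5_0054.py | analisar_lista_numeros
-- ===== SOURCE A (Python) =====
-- def analisar_lista_numeros(numeros: list[int]) -> tuple[int, int, int]:
--     """
--     Analisa uma lista de números inteiros para calcular a soma dos pares,
--     a contagem dos ímpares e o maior número.
--
--     Args:
--         numeros (list[int]): Uma lista de números inteiros.
--                              Assume-se que a lista não será vazia.
--
--     Returns:
--         tuple[int, int, int]: Uma tupla contendo:
--                               (soma_dos_pares, contagem_dos_impares, maior_numero).
--     """
--     soma_dos_pares = 0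
--     contagem_dos_impares = 0
--
--     # Inicializa maior_numero com o primeiro elemento, pois a lista não será vazia.
--     maior_numero = numeros[0]
--
--     for num in numeros:
--         if num % 2 == 0:
--             soma_dos_pares += num
--         else:
--             contagem_dos_impares += 1
--
--         if num > maior_numero:
--             maior_numero = num
--
--     return soma_dos_pares, contagem_dos_impares, maior_numero
-- ===== SOURCE B (Python) =====
-- def analisar_lista_numeros(numeros: list[int]) -> tuple[int, int, int]:
--     maior_numero = max(numeros)
--     soma_dos_pares = sum(n for n in numeros if n % 2 == 0)
--     contagem_dos_impares = sum(1 for n in numeros if n % 2 != 0)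
--     return soma_dos_pares, contagem_dos_impares, maior_numero
-- ===== Notes on version B (the rewrite author's own statement) =====
-- stated objective: simpler
-- what changed: Replaces the single fused loop with three independent built-in aggregations (max, a filtered sum, a filtered count).
import Mathlib
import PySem

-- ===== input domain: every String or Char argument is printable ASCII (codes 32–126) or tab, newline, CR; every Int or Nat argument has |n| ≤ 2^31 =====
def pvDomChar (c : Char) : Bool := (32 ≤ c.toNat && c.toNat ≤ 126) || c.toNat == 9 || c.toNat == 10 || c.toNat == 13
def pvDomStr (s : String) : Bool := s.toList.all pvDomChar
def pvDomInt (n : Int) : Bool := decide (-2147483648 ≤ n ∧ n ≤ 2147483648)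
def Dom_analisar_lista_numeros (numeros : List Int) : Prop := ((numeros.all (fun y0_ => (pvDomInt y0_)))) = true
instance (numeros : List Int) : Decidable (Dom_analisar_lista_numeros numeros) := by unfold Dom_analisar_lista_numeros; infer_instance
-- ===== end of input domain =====

-- B replaces A's single fused accumulator loop with three independent built-in
-- aggregations (max, a filtered sum, a filtered count): simpler, same O(n) cost.

-- ===== PORT A =====
-- A's fused loop over a triple accumulator; numeros[0] raises IndexError on [], excluded by Pre_.
def analisar_lista_numeros (numeros : List Int) : Int × Int × Int :=
  match numeros with
  | [] => (0, 0, 0)   -- unreachable under Pre_ (Python raises IndexError here)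
  | m0 :: _ =>
    numeros.foldl
      (fun (st : Int × Int × Int) num =>
        let (soma, cont, maior) := st
        let (soma, cont) := if num % 2 == 0 then (soma + num, cont) else (soma, cont + 1)
        let maior := if num > maior then num else maior
        (soma, cont, maior))
      (0, 0, m0)

-- ===== PORT B =====
-- B: max(numeros) via PySem.List.max?, then a filtered sum and a filtered count.
def analisar_lista_numeros_alt (numeros : List Int) : Int × Int × Int :=
  match PySem.List.max? numeros (fun x => x) with
  | none => (0, 0, 0)   -- unreachable under Pre_ (Python raises ValueError here)
  | some maior =>
    ((numeros.filter (fun n => n % 2 == 0)).sum,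
     ((numeros.filter (fun n => n % 2 != 0)).length : Int),
     maior)

-- ===== PRECONDITION & SPEC =====
-- Pre_ excludes the empty list, on which A raises IndexError (and B raises ValueError).
def Pre_analisar_lista_numeros (numeros : List Int) : Prop := numeros ≠ []
instance (numeros : List Int) : Decidable (Pre_analisar_lista_numeros numeros) := by unfold Pre_analisar_lista_numeros; infer_instance
def pvWitness_analisar_lista_numeros : List Int := [3, 4, -2, 7]

def Spec_analisar_lista_numeros (numeros : List Int) (out : Int × Int × Int) : Prop := out = analisar_lista_numeros_alt numeros
instance (numeros : List Int) (out : Int × Int × Int) : Decidable (Spec_analisar_lista_numeros numeros out) := by unfold Spec_analisar_lista_numeros; infer_instance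

-- ===== CLAIM (what is proved, stated in full; the proofs are below) =====
def Claim_equal_analisar_lista_numeros : Prop := ∀ (numeros : List Int), Dom_analisar_lista_numeros numeros → Pre_analisar_lista_numeros numeros → Spec_analisar_lista_numeros numeros (analisar_lista_numeros numeros)

-- ===== LEMMAS AND PROOFS =====

-- A's loop with arbitrary starting accumulator, characterised.
theorem analisar_foldl_char (xs : List Int) (s c m : Int) :
    xs.foldl
      (fun (st : Int × Int × Int) num =>
        let (soma, cont, maior) := st
        let (soma, cont) := if num % 2 == 0 then (soma + num, cont) else (soma, cont + 1)
        let maior := if num > maior then num else maior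
        (soma, cont, maior))
      (s, c, m)
    = (s + (xs.filter (fun n => n % 2 == 0)).sum,
       c + ((xs.filter (fun n => n % 2 != 0)).length : Int),
       xs.foldl max m) := by
  induction xs generalizing s c m with
  | nil => simp
  | cons x t ih =>
    simp only [List.foldl_cons, List.filter_cons]
    by_cases hx : x % 2 == 0
    · have hx' : (x % 2 != 0) = false := by simp_all
      simp only [hx, hx', if_true, ih, Prod.mk.injEq, List.sum_cons, Bool.false_eq_true,
        if_false]
      refine ⟨by ring, trivial, ?_⟩
      congr 1
      simp only [max_def]
      split_ifs <;> omega
    · have hx' : (x % 2 != 0) = true := by simp_all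
      simp only [hx, hx', if_false, if_true, ih, Prod.mk.injEq, List.length_cons,
        Bool.false_eq_true]
      refine ⟨trivial, by push_cast; ring, ?_⟩
      congr 1
      simp only [max_def]
      split_ifs <;> omega

-- ===== VERDICT (by name: the statement is the Claim_ definition above) =====
theorem analisar_lista_numeros_spec : Claim_equal_analisar_lista_numeros := by
  intro numeros _ hpre
  unfold Spec_analisar_lista_numeros analisar_lista_numeros analisar_lista_numeros_alt
  match numeros with
  | [] => exact absurd rfl hpre
  | x :: t =>
    rw [PySem.List.max?_id_cons]
    simp only [analisar_foldl_char, List.foldl_cons, List.filter_cons, Prod.mk.injEq]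
    by_cases hx : x % 2 == 0
    · have hx' : (x % 2 != 0) = false := by simp_all
      simp [hx, hx']
      try omega
    · have hx' : (x % 2 != 0) = true := by simp_all
      simp [hx, hx']
      try omega
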